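-- pv_equiv track=rewrite | github.com/benquick123/doors | utils/configuration.py | parse_cmd_args
-- ===== SOURCE A (Python) =====
-- def parse_cmd_args(remaining_args):
--     _remaining_args = []
--     arg_name_indices = [i for i, arg in enumerate(remaining_args) if arg.startswith("--")]
--     for i_curr, i_next in zip(arg_name_indices, arg_name_indices[1:] + [len(remaining_args)]):
--         arg = remaining_args[i_curr]
--         arg_value = " ".join(remaining_args[i_curr+1:i_next])
--         _remaining_args += [arg, arg_value]
--     return _remaining_args
-- ===== SOURCE B (Python) =====
-- def parse_cmd_args(remaining_args):
--     result = []
--     current_flag = None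
--     values = []
--     for arg in remaining_args:
--         if arg.startswith("--"):
--             if current_flag is not None:
--                 result.append(current_flag)
--                 result.append(" ".join(values))
--             current_flag = arg
--             values = []
--         else:
--             values.append(arg)
--     if current_flag is not None:
--         result.append(current_flag)
--         result.append(" ".join(values))
--     return result
-- ===== Notes on version B (the rewrite author's own statement) =====
-- stated objective: simpler
-- what changed: Replaced the precomputed flag-index list plus zip-of-adjacent-indices slicing with a single left-to-right pass that keeps the current flag and an accumulator of its values, flushing on each new flag and once at the end.
import Mathlib
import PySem

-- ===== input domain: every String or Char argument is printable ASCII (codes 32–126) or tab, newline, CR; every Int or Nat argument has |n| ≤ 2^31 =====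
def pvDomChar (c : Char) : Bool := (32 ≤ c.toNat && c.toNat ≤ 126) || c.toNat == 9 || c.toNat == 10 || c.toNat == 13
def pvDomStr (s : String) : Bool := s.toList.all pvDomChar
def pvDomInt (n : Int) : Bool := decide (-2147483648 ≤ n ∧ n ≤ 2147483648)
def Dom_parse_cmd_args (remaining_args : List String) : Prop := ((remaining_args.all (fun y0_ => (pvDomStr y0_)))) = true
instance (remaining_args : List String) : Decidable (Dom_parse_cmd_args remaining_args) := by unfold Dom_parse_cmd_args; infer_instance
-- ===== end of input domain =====

-- B replaces A's precomputed flag-index list + zip-of-adjacent-indices slicing by a single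
-- left-to-right pass keeping the current flag and its accumulated values (objective: simpler).

-- ===== PORT A =====
def parse_cmd_args (remaining_args : List String) : List String :=
  let arg_name_indices : List Int :=
    ((PySem.List.enumerate remaining_args).filter (fun p => PySem.Str.startswith p.2 "--")).map
      (fun p => p.1)
  (arg_name_indices.zip (arg_name_indices.tail ++ [(remaining_args.length : Int)])).foldl
    (fun acc p =>
      acc ++ [PySem.List.pyGetD remaining_args p.1 "",
              PySem.Str.join " " (PySem.List.slice remaining_args (some (p.1 + 1)) (some p.2))])
    []

-- ===== PORT B =====
def pvAltGo (l : List String) (res : List String) (cf : Option String) (vals : List String) :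
    List String :=
  match l with
  | [] =>
      match cf with
      | none => res
      | some f => res ++ [f, PySem.Str.join " " vals]
  | a :: rest =>
      if PySem.Str.startswith a "--" then
        match cf with
        | none => pvAltGo rest res (some a) []
        | some f => pvAltGo rest (res ++ [f, PySem.Str.join " " vals]) (some a) []
      else pvAltGo rest res cf (vals ++ [a])

def parse_cmd_args_alt (remaining_args : List String) : List String :=
  pvAltGo remaining_args [] none []

-- ===== PRECONDITION & SPEC =====
def Spec_parse_cmd_args (remaining_args : List String) (out : List String) : Prop := out = parse_cmd_args_alt remaining_args
instance (remaining_args : List String) (out : List String) : Decidable (Spec_parse_cmd_args remaining_args out) := by unfold Spec_parse_cmd_args; infer_instance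

-- ===== CLAIM (what is proved, stated in full; the proofs are below) =====
def Claim_equal_parse_cmd_args : Prop := ∀ (remaining_args : List String), Dom_parse_cmd_args remaining_args → Spec_parse_cmd_args remaining_args (parse_cmd_args remaining_args)

-- ===== LEMMAS AND PROOFS =====

def pvNonflag (s : String) : Bool := !PySem.Str.startswith s "--"

-- the common reference: the list of "--flag, joined values" chunks
def pvChunks : List String → List String
  | [] => []
  | a :: rest =>
    if PySem.Str.startswith a "--" then
      a :: PySem.Str.join " " (rest.takeWhile pvNonflag) :: pvChunks (rest.dropWhile pvNonflag)
    else pvChunks rest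
termination_by l => l.length
decreasing_by
  · have := List.length_dropWhile_le (p := pvNonflag) (l := rest); simp; omega
  · simp

theorem pvAltGo_some (l : List String) : ∀ (res vals : List String) (f : String),
    pvAltGo l res (some f) vals =
      res ++ [f, PySem.Str.join " " (vals ++ l.takeWhile pvNonflag)]
        ++ pvChunks (l.dropWhile pvNonflag) := by
  induction l with
  | nil => intro res vals f; simp [pvAltGo, pvChunks]
  | cons a rest ih =>
    intro res vals f
    by_cases h : PySem.Chars.startswith a.toList ['-', '-']
    · simp [pvAltGo, h, ih, pvChunks, pvNonflag]
    · simp [pvAltGo, h, ih, pvNonflag]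

theorem pvAltGo_none (l : List String) : ∀ (res vals : List String),
    pvAltGo l res none vals = res ++ pvChunks l := by
  induction l with
  | nil => intro res vals; simp [pvAltGo, pvChunks]
  | cons a rest ih =>
    intro res vals
    by_cases h : PySem.Chars.startswith a.toList ['-', '-']
    · simp [pvAltGo, h, pvAltGo_some, pvChunks]
    · simp [pvAltGo, h, ih, pvChunks]

theorem alt_eq_chunks (l : List String) : parse_cmd_args_alt l = pvChunks l := by
  simpa [parse_cmd_args_alt] using pvAltGo_none l [] []

-- A side
def pvFidx (l : List String) : List Int :=
  ((PySem.List.enumerate l).filter (fun p => PySem.Str.startswith p.2 "--")).map (fun p => p.1)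

def pvPairs (l : List String) : List (Int × Int) :=
  (pvFidx l).zip ((pvFidx l).tail ++ [(l.length : Int)])

def pvF (l : List String) (p : Int × Int) : List String :=
  [PySem.List.pyGetD l p.1 "",
   PySem.Str.join " " (PySem.List.slice l (some (p.1 + 1)) (some p.2))]

theorem a_eq_flatMap (l : List String) :
    parse_cmd_args l = (pvPairs l).flatMap (pvF l) := by
  unfold parse_cmd_args pvPairs pvFidx pvF
  simp only [PySem.List.foldl_append_eq_flatMap, List.nil_append]

theorem pvEnumerate_shift (xs : List String) : ∀ (s : Int),
    PySem.List.enumerate xs s = (PySem.List.enumerate xs 0).map (fun p => (p.1 + s, p.2)) := by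
  induction xs with
  | nil => intro s; simp [PySem.List.enumerate_nil]
  | cons x xs ih =>
    intro s
    rw [PySem.List.enumerate_cons, PySem.List.enumerate_cons, ih (s + 1)]
    simp only [zero_add]
    rw [ih 1]
    simp only [List.map_cons, List.map_map, zero_add]
    refine List.cons_eq_cons.mpr ⟨rfl, List.map_congr_left (fun p _ => by simp [Prod.ext_iff]; ring)⟩

theorem pvFidx_cons (a : String) (l : List String) :
    pvFidx (a :: l) =
      (if PySem.Chars.startswith a.toList ['-', '-'] then [(0 : Int)] else [])
        ++ (pvFidx l).map (· + 1) := by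
  unfold pvFidx
  rw [PySem.List.enumerate_cons]
  simp only [zero_add]
  rw [pvEnumerate_shift l 1]
  by_cases h : PySem.Chars.startswith a.toList ['-', '-'] <;>
    simp [h, List.filter_map, List.map_map, Function.comp_def]

theorem pvFidx_nonneg (l : List String) : ∀ k ∈ pvFidx l, 0 ≤ k := by
  induction l with
  | nil => simp [pvFidx, PySem.List.enumerate_nil]
  | cons a l ih =>
    intro k hk
    rw [pvFidx_cons] at hk
    rcases List.mem_append.1 hk with h | h
    · split at h <;> simp_all
    · obtain ⟨j, hj, rfl⟩ := List.mem_map.1 h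
      have := ih j hj; omega

theorem pvSplit_nil (l : List String) (h : pvFidx l = []) :
    l.takeWhile pvNonflag = l ∧ l.dropWhile pvNonflag = [] := by
  induction l with
  | nil => simp
  | cons a l ih =>
    rw [pvFidx_cons] at h
    by_cases hf : PySem.Chars.startswith a.toList ['-', '-']
    · simp [hf] at h
    · simp [hf] at h
      have := ih (by simp [h])
      simp [pvNonflag, hf, this.1, this.2]

theorem pvSplit_cons (l : List String) : ∀ (kN : Nat) (ks : List Int),
    pvFidx l = (kN : Int) :: ks →
    l.takeWhile pvNonflag = l.take kN ∧ l.dropWhile pvNonflag = l.drop kN := by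
  induction l with
  | nil => intro kN ks h; simp [pvFidx, PySem.List.enumerate_nil] at h
  | cons a l ih =>
    intro kN ks h
    rw [pvFidx_cons] at h
    by_cases hf : PySem.Chars.startswith a.toList ['-', '-']
    · simp [hf] at h
      have h0 : kN = 0 := by exact_mod_cast h.1.symm
      subst h0
      simp [pvNonflag, hf]
    · simp [hf] at h
      rcases hl : pvFidx l with _ | ⟨k', ks'⟩
      · rw [hl] at h; simp at h
      · rw [hl] at h
        simp at h
        have hk' : 0 ≤ k' := pvFidx_nonneg l k' (by rw [hl]; exact List.mem_cons_self ..)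
        obtain ⟨k'N, rfl⟩ := Int.eq_ofNat_of_zero_le hk'
        have hkN : kN = k'N + 1 := by have := h.1; omega
        subst hkN
        have := ih k'N ks' hl
        simp [pvNonflag, hf, this.1, this.2]

theorem pvChunks_dropWhile (l : List String) :
    pvChunks (l.dropWhile pvNonflag) = pvChunks l := by
  induction l with
  | nil => simp
  | cons a l ih =>
    by_cases hf : PySem.Chars.startswith a.toList ['-', '-']
    · simp [pvNonflag, hf]
    · have hnf : pvNonflag a = true := by simp [pvNonflag, hf]
      rw [List.dropWhile_cons, if_pos hnf, ih]
      simp [pvChunks, hf]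

theorem pvF_shift (a : String) (l : List String) (p : Int × Int)
    (h1 : 0 ≤ p.1) (h2 : 0 ≤ p.2) :
    pvF (a :: l) (p.1 + 1, p.2 + 1) = pvF l p := by
  obtain ⟨i, j⟩ := p
  simp only at h1 h2
  obtain ⟨n, rfl⟩ := Int.eq_ofNat_of_zero_le h1
  obtain ⟨m, rfl⟩ := Int.eq_ofNat_of_zero_le h2
  unfold pvF
  have c1 : ((n : Int) + 1) = ((n + 1 : Nat) : Int) := by push_cast; ring
  have c2 : ((n : Int) + 1 + 1) = ((n + 2 : Nat) : Int) := by push_cast; ring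
  have c3 : ((m : Int) + 1) = ((m + 1 : Nat) : Int) := by push_cast; ring
  have ht : m + 1 - (n + 2) = m - (n + 1) := by omega
  rw [c2, c3, c1]
  rw [PySem.List.pyGetD_natCast, PySem.List.pyGetD_natCast,
    PySem.List.slice_natCast, PySem.List.slice_natCast]
  simp [List.getD, ht, List.drop_succ_cons]

theorem pvFlatMap_congr {α β : Type} (f g : α → List β) (l : List α)
    (h : ∀ x ∈ l, f x = g x) : l.flatMap f = l.flatMap g := by
  induction l with
  | nil => rfl
  | cons x l ih =>
    simp only [List.flatMap_cons, h x (List.mem_cons_self ..),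
      ih (fun y hy => h y (List.mem_cons_of_mem _ hy))]

theorem pvPairs_mem_nonneg (l : List String) (p : Int × Int) (hp : p ∈ pvPairs l) :
    0 ≤ p.1 ∧ 0 ≤ p.2 := by
  obtain ⟨i, j⟩ := p
  have h := List.of_mem_zip hp
  refine ⟨pvFidx_nonneg l i h.1, ?_⟩
  rcases List.mem_append.1 h.2 with h2 | h2
  · exact pvFidx_nonneg l j (List.mem_of_mem_tail h2)
  · simp at h2; omega

theorem pvFlatMap_shift (a : String) (l : List String) :
    (pvPairs l).flatMap (fun p => pvF (a :: l) (p.1 + 1, p.2 + 1)) =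
      (pvPairs l).flatMap (pvF l) :=
  pvFlatMap_congr _ _ _ (fun p hp => by
    have h := pvPairs_mem_nonneg l p hp
    exact pvF_shift a l p h.1 h.2)

theorem pvTail_shift (l : List String) :
    ((pvFidx l).map (· + 1)).tail ++ [((l.length : Int) + 1)] =
      ((pvFidx l).tail ++ [(l.length : Int)]).map (· + 1) := by
  rw [List.map_append, ← List.map_tail]
  simp

theorem pvPairs_cons_nonflag (a : String) (l : List String)
    (hf : ¬ PySem.Chars.startswith a.toList ['-', '-']) :
    pvPairs (a :: l) = (pvPairs l).map (fun p => (p.1 + 1, p.2 + 1)) := by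
  unfold pvPairs
  rw [pvFidx_cons]
  simp only [hf, if_neg, Bool.false_eq_true, not_false_iff, List.nil_append]
  have hlen : ((a :: l).length : Int) = (l.length : Int) + 1 := by
    simp
  rw [hlen, pvTail_shift, List.zip_map]
  exact List.map_congr_left (fun p _ => by obtain ⟨x, y⟩ := p; rfl)

theorem a_eq_chunks (l : List String) :
    (pvPairs l).flatMap (pvF l) = pvChunks l := by
  induction l with
  | nil => simp [pvPairs, pvFidx, PySem.List.enumerate_nil, pvChunks]
  | cons a l ih =>
    by_cases hf : PySem.Chars.startswith a.toList ['-', '-']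
    · -- head is a flag
      have hchunks : pvChunks (a :: l) =
          a :: PySem.Str.join " " (l.takeWhile pvNonflag) :: pvChunks (l.dropWhile pvNonflag) := by
        simp [pvChunks, hf]
      rcases hl : pvFidx l with _ | ⟨k, ks⟩
      · -- no flags in the tail
        have hsplit := pvSplit_nil l hl
        have hpairs : pvPairs (a :: l) = [((0 : Int), ((l.length : Int) + 1))] := by
          unfold pvPairs
          rw [pvFidx_cons, hl]
          simp [hf, List.length_cons]
        have hslice : PySem.List.slice (a :: l) (some (1 : Int))
            (some ((l.length : Int) + 1)) = l := by
          have c1 : (1 : Int) = ((1 : Nat) : Int) := by norm_num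
          have c2 : ((l.length : Int) + 1) = ((l.length + 1 : Nat) : Int) := by push_cast; ring
          rw [c2, c1, PySem.List.slice_natCast]
          simp
        rw [hpairs, hchunks, hsplit.1, hsplit.2]
        simp [pvF, PySem.List.pyGetD_zero_cons, pvChunks]
        rw [hslice]
      · -- tail has a first flag k
        have hk : 0 ≤ k := pvFidx_nonneg l k (by rw [hl]; exact List.mem_cons_self ..)
        obtain ⟨kN, rfl⟩ := Int.eq_ofNat_of_zero_le hk
        have hsplit := pvSplit_cons l kN ks hl
        have hpairs : pvPairs (a :: l) =
            ((0 : Int), ((kN : Int) + 1)) :: (pvPairs l).map (fun p => (p.1 + 1, p.2 + 1)) := by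
          unfold pvPairs
          rw [pvFidx_cons, hl]
          simp only [hf, if_pos, List.map_cons, List.cons_append, List.nil_append,
            List.tail_cons, List.length_cons]
          rw [List.zip_cons_cons]
          congr 1
          have e3 : (((l.length + 1 : Nat)) : Int) = ((l.length : Int) + 1) := by push_cast; ring
          have e1 : ((kN : Int) + 1) :: List.map (· + 1) ks =
              List.map (· + (1 : Int)) ((kN : Int) :: ks) := by simp
          have e2 : List.map (· + (1 : Int)) ks ++ [((l.length : Int) + 1)] =
              List.map (· + (1 : Int)) (ks ++ [(l.length : Int)]) := by simp
          rw [e3, e1, e2, List.zip_map]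
          rfl
        have hslice : PySem.List.slice (a :: l) (some (1 : Int))
            (some ((kN : Int) + 1)) = l.take kN := by
          have c1 : (1 : Int) = ((1 : Nat) : Int) := by norm_num
          have c2 : ((kN : Int) + 1) = ((kN + 1 : Nat) : Int) := by push_cast; ring
          rw [c2, c1, PySem.List.slice_natCast]
          simp
        rw [hpairs, List.flatMap_cons, List.flatMap_map]
        have : (fun p : Int × Int => pvF (a :: l) ((fun p : Int × Int => (p.1 + 1, p.2 + 1)) p)) =
            fun p : Int × Int => pvF (a :: l) (p.1 + 1, p.2 + 1) := rfl
        rw [this, pvFlatMap_shift, ih, hchunks, hsplit.1]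
        simp [pvF, PySem.List.pyGetD_zero_cons]
        rw [hslice, pvChunks_dropWhile]
        exact ⟨rfl, rfl⟩
    · -- head is not a flag
      have hpairs := pvPairs_cons_nonflag a l hf
      have hchunks : pvChunks (a :: l) = pvChunks l := by
        simp [pvChunks, hf]
      rw [hpairs, hchunks, List.flatMap_map]
      have : (fun p : Int × Int => pvF (a :: l) ((fun p : Int × Int => (p.1 + 1, p.2 + 1)) p)) =
          fun p : Int × Int => pvF (a :: l) (p.1 + 1, p.2 + 1) := rfl
      rw [this, pvFlatMap_shift, ih]

theorem parse_cmd_args_spec : Claim_equal_parse_cmd_args := by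
  intro l _
  unfold Spec_parse_cmd_args
  rw [a_eq_flatMap, a_eq_chunks, alt_eq_chunks]
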